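-- pv_equiv track=rewrite | github.com/Yun04kaGasai/Bifithon | tools/bifc.py | replace_module_access
-- ===== SOURCE A (Python) =====
-- def replace_module_access(expr: str, modules) -> str:
--     out = []
--     in_string = False
--     string_char = ""
--     escaped = False
--     i = 0
--
--     while i < len(expr):
--         ch = expr[i]
--
--         if in_string:
--             out.append(ch)
--             if escaped:
--                 escaped = False
--             elif ch == "\\":
--                 escaped = True
--             elif ch == string_char:
--                 in_string = False
--             i += 1
--             continue
--
--         if ch in ("\"", "'"):
--             in_string = True
--             string_char = ch
--             out.append(ch)
--             i += 1
--             continue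
--
--         matched = False
--         for module_name in modules:
--             token = f"{module_name}."
--             if expr.startswith(token, i):
--                 out.append(f"{module_name}::")
--                 i += len(token)
--                 matched = True
--                 break
--
--         if matched:
--             continue
--
--         out.append(ch)
--         i += 1
--
--     return "".join(out)
-- ===== SOURCE B (Python) =====
-- def _string_end(expr, i, quote):
--     # index just past the closing quote (escapes jump two chars); len(expr) if unterminated
--     n = len(expr)
--     while i < n:
--         c = expr[i]
--         if c == "\\":
--             i += 2
--         elif c == quote:
--             return i + 1
--         else:
--             i += 1
--     return n
--
--
-- def replace_module_access(expr: str, modules) -> str: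
--     parts = []
--     i = 0
--     n = len(expr)
--     while i < n:
--         ch = expr[i]
--         if ch == '"' or ch == "'":
--             j = _string_end(expr, i + 1, ch)
--             parts.append(expr[i:j])
--             i = j
--         else:
--             name = next((m for m in modules if expr.startswith(m + ".", i)), None)
--             if name is None:
--                 parts.append(ch)
--                 i += 1
--             else:
--                 parts.append(name + "::")
--                 i += len(name) + 1
--     return "".join(parts)
-- ===== Notes on version B (the rewrite author's own statement) =====
-- stated objective: alternative
-- what changed: Replaced A's per-character state machine (in_string/string_char/escaped flags threaded through one loop) by a token-level scanner: a helper computes the end index of a string literal arithmetically (escapes skip two chars) and the literal is appended as one slice, so the main loop carries no string/escape state.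
import Mathlib
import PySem

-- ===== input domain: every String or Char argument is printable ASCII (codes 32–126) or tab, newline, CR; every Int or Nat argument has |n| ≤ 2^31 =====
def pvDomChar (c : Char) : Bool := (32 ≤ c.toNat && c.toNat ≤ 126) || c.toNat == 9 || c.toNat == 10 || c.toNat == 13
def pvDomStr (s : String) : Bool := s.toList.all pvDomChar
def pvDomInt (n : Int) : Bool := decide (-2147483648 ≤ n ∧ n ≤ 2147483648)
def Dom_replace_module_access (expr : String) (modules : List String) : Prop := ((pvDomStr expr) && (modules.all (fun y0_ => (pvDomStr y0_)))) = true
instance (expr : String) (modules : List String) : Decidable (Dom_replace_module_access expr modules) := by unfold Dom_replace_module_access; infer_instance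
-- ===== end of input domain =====

-- B replaces A's flag-carrying per-character state machine by a token-level scanner that
-- consumes each string literal as one slice (alternative decomposition, same cost).
-- Each while loop is ported with a fuel parameter (initial fuel = length of the string) purely
-- as a totality guard: every iteration advances the index by at least one, so the fuel never
-- runs out before the loop's own exit condition.

-- ===== PORT A =====
-- Python A's inner `for module_name in modules: if expr.startswith(token, i)` loop;
-- startswith(token, i) is ported as isPrefixOf on the suffix (exact, i ≥ 0 here).
def findTokenA : List String → List Char → Nat → Option String
  | [], _, _ => none
  | m :: rest, l, i =>
    if (m.toList ++ ['.']).isPrefixOf (l.drop i) then some m else findTokenA rest l i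

-- Python A's while loop, state (out, in_string, string_char, escaped, i); `ch` is inlined as l[i].
def loopA (modules : List String) (l : List Char) : Nat → List Char → Bool → Char → Bool → Nat → List Char
  | 0, out, _, _, _, _ => out
  | fuel + 1, out, inS, sc, esc, i =>
    if h : i < l.length then
      if inS then
        if esc then loopA modules l fuel (out ++ [l[i]]) inS sc false (i + 1)
        else if l[i] == '\\' then loopA modules l fuel (out ++ [l[i]]) inS sc true (i + 1)
        else if l[i] == sc then loopA modules l fuel (out ++ [l[i]]) false sc esc (i + 1)
        else loopA modules l fuel (out ++ [l[i]]) inS sc esc (i + 1)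
      else if l[i] == '"' || l[i] == '\'' then
        loopA modules l fuel (out ++ [l[i]]) true (l[i]) esc (i + 1)
      else
        match findTokenA modules l i with
        | some m => loopA modules l fuel (out ++ m.toList ++ [':', ':']) inS sc esc (i + (m.toList.length + 1))
        | none => loopA modules l fuel (out ++ [l[i]]) inS sc esc (i + 1)
    else out

-- string_char starts as Python's "" (never compared while in_string is false); ' ' stands in for it.
def replace_module_access (expr : String) (modules : List String) : String :=
  String.mk (loopA modules expr.toList expr.toList.length [] false ' ' false 0)

-- ===== PORT B =====
-- Source B's _string_end: index just past the closing quote, escapes jump two chars.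
def stringEndB (l : List Char) (q : Char) : Nat → Nat → Nat
  | 0, _ => l.length
  | fuel + 1, i =>
    if h : i < l.length then
      if l[i] == '\\' then stringEndB l q fuel (i + 2)
      else if l[i] == q then i + 1
      else stringEndB l q fuel (i + 1)
    else l.length

-- Source B's generator `next((m for m in modules if expr.startswith(m + ".", i)), None)`.
def findTokenB : List String → List Char → Nat → Option String
  | [], _, _ => none
  | m :: rest, l, i =>
    if (m.toList ++ ['.']).isPrefixOf (l.drop i) then some m else findTokenB rest l i

-- Source B's main while loop; expr[i:j] is the slice (l.drop i).take (j - i) (exact, 0 ≤ i ≤ j).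
def loopB (modules : List String) (l : List Char) : Nat → List Char → Nat → List Char
  | 0, parts, _ => parts
  | fuel + 1, parts, i =>
    if h : i < l.length then
      if l[i] == '"' || l[i] == '\'' then
        loopB modules l fuel
          (parts ++ (l.drop i).take (stringEndB l (l[i]) l.length (i + 1) - i))
          (stringEndB l (l[i]) l.length (i + 1))
      else
        match findTokenB modules l i with
        | none => loopB modules l fuel (parts ++ [l[i]]) (i + 1)
        | some m => loopB modules l fuel (parts ++ m.toList ++ [':', ':']) (i + (m.toList.length + 1))
    else parts

def replace_module_access_alt (expr : String) (modules : List String) : String :=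
  String.mk (loopB modules expr.toList expr.toList.length [] 0)

-- ===== PRECONDITION & SPEC =====
def Spec_replace_module_access (expr : String) (modules : List String) (out : String) : Prop := out = replace_module_access_alt expr modules
instance (expr : String) (modules : List String) (out : String) : Decidable (Spec_replace_module_access expr modules out) := by unfold Spec_replace_module_access; infer_instance

-- ===== CLAIM (what is proved, stated in full; the proofs are below) =====
def Claim_equal_replace_module_access : Prop := ∀ (expr : String) (modules : List String), Dom_replace_module_access expr modules → Spec_replace_module_access expr modules (replace_module_access expr modules)

-- ===== LEMMAS AND PROOFS =====

theorem findTokenAB (modules : List String) (l : List Char) (i : Nat) :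
    findTokenA modules l i = findTokenB modules l i := by
  induction modules with
  | nil => rfl
  | cons m rest ih => simp [findTokenA, findTokenB, ih]


theorem stringEndB_stop (l : List Char) (q : Char) (f i : Nat) (h : ¬ i < l.length) :
    stringEndB l q f i = l.length := by
  cases f with
  | zero => rfl
  | succ f => rw [stringEndB]; simp [h]

theorem loopA_stop (modules : List String) (l : List Char) (f : Nat) (out : List Char)
    (inS : Bool) (sc : Char) (esc : Bool) (i : Nat) (h : ¬ i < l.length) :
    loopA modules l f out inS sc esc i = out := by
  cases f with
  | zero => rfl
  | succ f => rw [loopA]; simp [h]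

theorem loopB_stop (modules : List String) (l : List Char) (f : Nat) (parts : List Char) (i : Nat) (h : ¬ i < l.length) :
    loopB modules l f parts i = parts := by
  cases f with
  | zero => rfl
  | succ f => rw [loopB]; simp [h]

-- any sufficient fuel computes the same string end
theorem stringEndB_fuel (l : List Char) (q : Char) :
    ∀ f g i, l.length - i ≤ f → l.length - i ≤ g →
      stringEndB l q f i = stringEndB l q g i := by
  intro f
  induction f with
  | zero =>
    intro g i hf _
    have hi : ¬ i < l.length := by omega
    rw [stringEndB_stop l q _ i hi, stringEndB_stop l q _ i hi]
  | succ f ihf =>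
    intro g i hf hg
    by_cases hi : i < l.length
    · cases g with
      | zero => omega
      | succ g =>
        rw [stringEndB, stringEndB]
        simp only [dif_pos hi]
        by_cases hb : (l[i] == '\\') = true
        · rw [if_pos hb, if_pos hb, ihf g (i + 2) (by omega) (by omega)]
        · rw [if_neg hb, if_neg hb]
          by_cases hc : (l[i] == q) = true
          · rw [if_pos hc, if_pos hc]
          · rw [if_neg hc, if_neg hc, ihf g (i + 1) (by omega) (by omega)]
    · rw [stringEndB_stop l q _ i hi, stringEndB_stop l q _ i hi]

-- one unfolding step of stringEndB at the canonical fuel l.length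
theorem stringEndB_step (l : List Char) (q : Char) (i : Nat) (h : i < l.length) :
    stringEndB l q l.length i =
      if l[i] == '\\' then stringEndB l q l.length (i + 2)
      else if l[i] == q then i + 1
      else stringEndB l q l.length (i + 1) := by
  have hf : l.length - i ≤ l.length := by omega
  have h1 : ∃ f, l.length = f + 1 := ⟨l.length - 1, by omega⟩
  obtain ⟨f, hf1⟩ := h1
  calc stringEndB l q l.length i = stringEndB l q (f + 1) i := by rw [← hf1]
    _ = _ := by
        rw [stringEndB]
        simp only [dif_pos h]
        by_cases hb : (l[i] == '\\') = true
        · rw [if_pos hb, if_pos hb, stringEndB_fuel l q f l.length (i + 2) (by omega) (by omega)]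
        · rw [if_neg hb, if_neg hb]
          by_cases hc : (l[i] == q) = true
          · rw [if_pos hc, if_pos hc]
          · rw [if_neg hc, if_neg hc, stringEndB_fuel l q f l.length (i + 1) (by omega) (by omega)]

theorem stringEndB_ge (l : List Char) (q : Char) :
    ∀ f i, min i l.length ≤ stringEndB l q f i := by
  intro f
  induction f with
  | zero => intro i; rw [stringEndB]; omega
  | succ f ihf =>
    intro i
    rw [stringEndB]
    by_cases hi : i < l.length
    · simp only [dif_pos hi]
      have h2 := ihf (i + 2)
      have h1 := ihf (i + 1)
      split_ifs <;> omega
    · simp only [dif_neg hi]; omega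

-- any sufficient fuel runs loopA to completion
theorem loopA_fuel (modules : List String) (l : List Char) :
    ∀ f g i out inS sc esc, l.length - i ≤ f → l.length - i ≤ g →
      loopA modules l f out inS sc esc i = loopA modules l g out inS sc esc i := by
  intro f
  induction f with
  | zero =>
    intro g i out inS sc esc hf _
    have hi : ¬ i < l.length := by omega
    rw [loopA_stop modules l _ out inS sc esc i hi, loopA_stop modules l _ out inS sc esc i hi]
  | succ f ihf =>
    intro g i out inS sc esc hf hg
    by_cases hi : i < l.length
    · cases g with
      | zero => omega
      | succ g =>
        rw [loopA, loopA]
        simp only [dif_pos hi]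
        have ih1 : ∀ out' inS' sc' esc', loopA modules l f out' inS' sc' esc' (i + 1)
            = loopA modules l g out' inS' sc' esc' (i + 1) :=
          fun out' inS' sc' esc' => ihf g (i + 1) out' inS' sc' esc' (by omega) (by omega)
        cases inS with
        | true =>
          simp only [reduceIte]
          split_ifs <;> exact ih1 _ _ _ _
        | false =>
          simp only [Bool.false_eq_true, if_neg (by simp : ¬ False)]
          by_cases hq : (l[i] == '"' || l[i] == '\'') = true
          · rw [if_pos hq, if_pos hq, ih1]
          · rw [if_neg hq, if_neg hq]
            cases hfind : findTokenA modules l i with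
            | some m =>
              exact ihf g (i + (m.toList.length + 1)) _ _ _ _ (by omega) (by omega)
            | none => exact ih1 _ _ _ _
    · rw [loopA_stop modules l _ out inS sc esc i hi, loopA_stop modules l _ out inS sc esc i hi]

-- any sufficient fuel runs loopB to completion
theorem loopB_fuel (modules : List String) (l : List Char) :
    ∀ f g i parts, l.length - i ≤ f → l.length - i ≤ g →
      loopB modules l f parts i = loopB modules l g parts i := by
  intro f
  induction f with
  | zero =>
    intro g i parts hf _
    have hi : ¬ i < l.length := by omega
    rw [loopB_stop modules l _ parts i hi, loopB_stop modules l _ parts i hi]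
  | succ f ihf =>
    intro g i parts hf hg
    by_cases hi : i < l.length
    · cases g with
      | zero => omega
      | succ g =>
        rw [loopB, loopB]
        simp only [dif_pos hi]
        by_cases hq : (l[i] == '"' || l[i] == '\'') = true
        · rw [if_pos hq, if_pos hq]
          have hge := stringEndB_ge l (l[i]'hi) l.length (i + 1)
          exact ihf g (stringEndB l (l[i]'hi) l.length (i + 1)) _ (by omega) (by omega)
        · rw [if_neg hq, if_neg hq]
          cases hfind : findTokenB modules l i with
          | some m => exact ihf g (i + (m.toList.length + 1)) _ (by omega) (by omega)
          | none => exact ihf g (i + 1) _ (by omega) (by omega)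
    · rw [loopB_stop modules l _ parts i hi, loopB_stop modules l _ parts i hi]

-- one unfolding step at the canonical fuel l.length (recursive occurrences renormalised to fuel l.length)
theorem loopA_step (modules : List String) (l : List Char) (out : List Char)
    (inS : Bool) (sc : Char) (esc : Bool) (i : Nat) (h : i < l.length) :
    loopA modules l l.length out inS sc esc i =
      (if inS then
        if esc then loopA modules l l.length (out ++ [l[i]]) inS sc false (i + 1)
        else if l[i] == '\\' then loopA modules l l.length (out ++ [l[i]]) inS sc true (i + 1)
        else if l[i] == sc then loopA modules l l.length (out ++ [l[i]]) false sc esc (i + 1)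
        else loopA modules l l.length (out ++ [l[i]]) inS sc esc (i + 1)
      else if l[i] == '"' || l[i] == '\'' then
        loopA modules l l.length (out ++ [l[i]]) true (l[i]) esc (i + 1)
      else
        match findTokenA modules l i with
        | some m => loopA modules l l.length (out ++ m.toList ++ [':', ':']) inS sc esc (i + (m.toList.length + 1))
        | none => loopA modules l l.length (out ++ [l[i]]) inS sc esc (i + 1)) := by
  obtain ⟨f, hf1⟩ : ∃ f, l.length = f + 1 := ⟨l.length - 1, by omega⟩
  calc loopA modules l l.length out inS sc esc i = loopA modules l (f + 1) out inS sc esc i := by rw [← hf1]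
    _ = _ := by
        rw [loopA]
        simp only [dif_pos h]
        have ih1 : ∀ out' inS' sc' esc', loopA modules l f out' inS' sc' esc' (i + 1)
            = loopA modules l l.length out' inS' sc' esc' (i + 1) :=
          fun out' inS' sc' esc' => loopA_fuel modules l f l.length (i + 1) out' inS' sc' esc' (by omega) (by omega)
        cases inS with
        | true =>
          simp only [reduceIte]
          split_ifs <;> exact ih1 _ _ _ _
        | false =>
          simp only [Bool.false_eq_true, if_neg (by simp : ¬ False)]
          by_cases hq : (l[i] == '"' || l[i] == '\'') = true
          · rw [if_pos hq, if_pos hq, ih1]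
          · rw [if_neg hq, if_neg hq]
            cases hfind : findTokenA modules l i with
            | some m =>
              exact loopA_fuel modules l f l.length (i + (m.toList.length + 1)) _ _ _ _ (by omega) (by omega)
            | none => exact ih1 _ _ _ _

theorem loopB_step (modules : List String) (l : List Char) (parts : List Char) (i : Nat) (h : i < l.length) :
    loopB modules l l.length parts i =
      (if l[i] == '"' || l[i] == '\'' then
        loopB modules l l.length
          (parts ++ (l.drop i).take (stringEndB l (l[i]) l.length (i + 1) - i))
          (stringEndB l (l[i]) l.length (i + 1))
      else
        match findTokenB modules l i with
        | none => loopB modules l l.length (parts ++ [l[i]]) (i + 1)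
        | some m => loopB modules l l.length (parts ++ m.toList ++ [':', ':']) (i + (m.toList.length + 1))) := by
  obtain ⟨f, hf1⟩ : ∃ f, l.length = f + 1 := ⟨l.length - 1, by omega⟩
  calc loopB modules l l.length parts i = loopB modules l (f + 1) parts i := by rw [← hf1]
    _ = _ := by
        rw [loopB]
        simp only [dif_pos h]
        by_cases hq : (l[i] == '"' || l[i] == '\'') = true
        · rw [if_pos hq, if_pos hq]
          have hge := stringEndB_ge l (l[i]'h) l.length (i + 1)
          exact loopB_fuel modules l f l.length _ _ (by omega) (by omega)
        · rw [if_neg hq, if_neg hq]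
          cases hfind : findTokenB modules l i with
          | some m => exact loopB_fuel modules l f l.length _ _ (by omega) (by omega)
          | none => exact loopB_fuel modules l f l.length _ _ (by omega) (by omega)

-- Main simultaneous invariant: outside strings A's machine equals B's scanner (M);
-- inside a string at position i, A's flag walk equals B's one-slice append at stringEndB (S).
theorem loopAB (modules : List String) (l : List Char) :
    ∀ k i, l.length - i ≤ k →
      ((∀ out sc, loopA modules l l.length out false sc false i = loopB modules l l.length out i) ∧
       (∀ q out, i ≤ l.length →
         loopA modules l l.length out true q false i =
           loopB modules l l.length (out ++ (l.drop i).take (stringEndB l q l.length i - i))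
             (stringEndB l q l.length i))) := by
  intro k
  induction k with
  | zero =>
    intro i hk
    have hi : ¬ i < l.length := by omega
    constructor
    · intro out sc
      rw [loopA_stop modules l l.length out false sc false i hi, loopB_stop modules l l.length out i hi]
    · intro q out hle
      rw [loopA_stop modules l l.length out true q false i hi,
        stringEndB_stop l q l.length i hi,
        loopB_stop modules l l.length _ l.length (lt_irrefl l.length)]
      simp [(by omega : l.length - i = 0)]
  | succ k ih =>
    intro i hk
    by_cases h : i < l.length
    · have ih1 := ih (i + 1) (by omega)
      constructor
      · intro out sc
        rw [loopA_step modules l out false sc false i h, loopB_step modules l out i h]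
        simp only [Bool.false_eq_true, if_neg (by simp : ¬ False)]
        by_cases hq : (l[i] == '"' || l[i] == '\'') = true
        · rw [if_pos hq, if_pos hq]
          have hge := stringEndB_ge l (l[i]'h) l.length (i + 1)
          have hj1 : i + 1 ≤ stringEndB l (l[i]'h) l.length (i + 1) := by omega
          have hd : l.drop i = l[i]'h :: l.drop (i + 1) := List.drop_eq_getElem_cons h
          have harith : stringEndB l (l[i]'h) l.length (i + 1) - i
              = (stringEndB l (l[i]'h) l.length (i + 1) - (i + 1)) + 1 := by omega
          rw [hd, harith, List.take_succ_cons]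
          have hS := ih1.2 (l[i]'h) (out ++ [l[i]'h]) (by omega)
          simpa [List.append_assoc] using hS
        · rw [if_neg hq, if_neg hq, findTokenAB]
          cases hf : findTokenB modules l i with
          | some m => exact (ih (i + (m.toList.length + 1)) (by omega)).1 _ sc
          | none => exact ih1.1 _ sc
      · intro q out hle
        rw [loopA_step modules l out true q false i h]
        simp only [if_neg (by simp : ¬ (false = true))]
        by_cases hb : (l[i] == '\\') = true
        · rw [if_pos hb]
          conv_rhs => rw [stringEndB_step l q i h]
          rw [if_pos hb]
          by_cases h2 : i + 1 < l.length
          · rw [loopA_step modules l _ true q true (i + 1) h2]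
            simp only [reduceIte]
            have ih2 := ih (i + 2) (by omega)
            have hge := stringEndB_ge l q l.length (i + 2)
            have hj2 : min (i + 2) l.length ≤ stringEndB l q l.length (i + 2) := hge
            have hd1 : l.drop i = l[i]'h :: l.drop (i + 1) := List.drop_eq_getElem_cons h
            have hd2 : l.drop (i + 1) = l[i+1]'h2 :: l.drop (i + 2) := List.drop_eq_getElem_cons h2
            have harith : stringEndB l q l.length (i + 2) - i
                = ((stringEndB l q l.length (i + 2) - (i + 2)) + 1) + 1 := by omega
            rw [hd1, hd2, harith, List.take_succ_cons, List.take_succ_cons]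
            have hS := ih2.2 q (out ++ [l[i]'h] ++ [l[i+1]'h2]) (by omega)
            simpa [List.append_assoc] using hS
          · rw [loopA_stop modules l l.length _ true q true (i + 1) h2]
            rw [stringEndB_stop l q l.length (i + 2) (by omega),
              loopB_stop modules l l.length _ l.length (lt_irrefl l.length)]
            have hd1 : l.drop i = [l[i]'h] := by
              rw [List.drop_eq_getElem_cons h, List.drop_eq_nil_iff.mpr (by omega)]
            rw [hd1, (by omega : l.length - i = 1)]
            simp
        · rw [if_neg hb]
          by_cases hc : (l[i] == q) = true
          · rw [if_pos hc]
            conv_rhs => rw [stringEndB_step l q i h]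
            rw [if_neg hb, if_pos hc]
            have hseg : (l.drop i).take (i + 1 - i) = [l[i]'h] := by
              rw [(by omega : i + 1 - i = 1), List.drop_eq_getElem_cons h]
              rfl
            rw [hseg]
            exact ih1.1 (out ++ [l[i]'h]) q
          · rw [if_neg hc]
            conv_rhs => rw [stringEndB_step l q i h]
            rw [if_neg hb, if_neg hc]
            have hge := stringEndB_ge l q l.length (i + 1)
            have hj1 : i + 1 ≤ stringEndB l q l.length (i + 1) := by omega
            have hd : l.drop i = l[i]'h :: l.drop (i + 1) := List.drop_eq_getElem_cons h
            have harith : stringEndB l q l.length (i + 1) - i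
                = (stringEndB l q l.length (i + 1) - (i + 1)) + 1 := by omega
            rw [hd, harith, List.take_succ_cons]
            have hS := ih1.2 q (out ++ [l[i]'h]) (by omega)
            simpa [List.append_assoc] using hS
    · constructor
      · intro out sc
        rw [loopA_stop modules l l.length out false sc false i h, loopB_stop modules l l.length out i h]
      · intro q out hle
        rw [loopA_stop modules l l.length out true q false i h,
          stringEndB_stop l q l.length i h,
          loopB_stop modules l l.length _ l.length (lt_irrefl l.length)]
        simp [(by omega : l.length - i = 0)]

-- ===== VERDICT (by name: the statement is the Claim_ definition above) =====
theorem replace_module_access_spec : Claim_equal_replace_module_access := by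
  intro expr modules _
  unfold Spec_replace_module_access replace_module_access replace_module_access_alt
  exact congrArg String.mk
    (((loopAB modules expr.toList expr.toList.length 0 (by omega)).1) [] ' ')
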